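-- pv_equiv track=rewrite | github.com/nciovanac/DTA-Challenge | dtamod/prepare_test_data.py | convertLongTokens
-- ===== SOURCE A (Python) =====
-- def convertLongTokens(smiles):
--     """Attempts to convert the most common two character smiles into single character tokens.
--     If any more exotic characters are found, e.g. W, they will be converted into a blank token
--     """
--
--     long_tokens = {
--         "Br":"X",
--         "Ni": "Y",
--         "Cl" : "Z"}
--
--
--     short_tokens = ['K', 'b','(', '+', '9', 'S', 'F', '8', '.', '1', '5', '-', 'N', '/', '[', 'n', 'C', '7', ')', 'O', '%', '0', '#', '6', 'B', '\\', '@', ']', '4', '=', 'P', '2', '3', 's', 'I','H', "X","Y","Z", " "]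
--
--     set_short_tokens = set(short_tokens)
--     # Dictionary of prots
--
--
--     proteins = [ "A",
--              "C",
--              "B",
--              "E",
--              "D",
--              "G",
--              "F",
--              "I",
--              "H",
--              "K",
--              "M",
--              "L",
-- 	     "O",
--              "N",
--              "Q",
--              "P",
--              "S",
--              "R",
-- 	     "U",
--              "T",
--              "W",
-- 	     "V",
--              "Y",
--              "X",
-- 	     "Z",
--              " "]
--
--
--     for lt, st in long_tokens.items():
--         smiles = smiles.replace(lt, st)
--     irregulars = set(smiles) - set_short_tokens
--     if irregulars:
--         for token in list(irregulars):
--             smiles = smiles.replace(token, " ")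
--     return smiles
-- ===== SOURCE B (Python) =====
-- def convertLongTokens(smiles):
--     """Same conversion, as one character-mapping pass after the two-char replacements."""
--     allowed = set('Kb(+9SF8.15-N/[nC7)O%0#6B\\@]4=P23sIHXYZ ')
--     smiles = smiles.replace("Br", "X").replace("Ni", "Y").replace("Cl", "Z")
--     return ''.join(c if c in allowed else ' ' for c in smiles)
-- ===== Notes on version B (the rewrite author's own statement) =====
-- stated objective: simpler
-- what changed: After the three literal two-char replacements, B replaces A's set-difference-then-one-whole-string-replace-per-irregular-character phase by a single left-to-right per-character mapping pass (keep allowed chars, emit a space otherwise).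
import Mathlib
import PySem

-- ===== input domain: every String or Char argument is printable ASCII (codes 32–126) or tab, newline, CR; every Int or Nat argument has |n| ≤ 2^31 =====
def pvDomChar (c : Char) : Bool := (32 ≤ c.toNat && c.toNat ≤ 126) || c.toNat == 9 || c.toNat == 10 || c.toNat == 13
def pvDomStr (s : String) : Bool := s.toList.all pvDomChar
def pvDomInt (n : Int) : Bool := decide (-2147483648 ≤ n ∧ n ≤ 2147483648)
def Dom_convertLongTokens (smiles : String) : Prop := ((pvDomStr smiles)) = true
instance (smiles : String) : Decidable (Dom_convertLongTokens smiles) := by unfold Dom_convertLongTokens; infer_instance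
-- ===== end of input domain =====

-- B replaces A's "set-difference then one whole-string replace per irregular character" phase
-- by a single per-character mapping pass (objective: simpler).

-- ===== PORT A =====
def convertLongTokens (smiles : String) : String :=
  let longTokens : List (String × String) := [("Br", "X"), ("Ni", "Y"), ("Cl", "Z")]
  let shortTokens : List Char :=
    ['K', 'b', '(', '+', '9', 'S', 'F', '8', '.', '1', '5', '-', 'N', '/', '[', 'n', 'C', '7',
     ')', 'O', '%', '0', '#', '6', 'B', '\\', '@', ']', '4', '=', 'P', '2', '3', 's', 'I', 'H',
     'X', 'Y', 'Z', ' ']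
  let setShortTokens : PySem.Set Char := PySem.Set.ofList shortTokens
  -- for lt, st in long_tokens.items(): smiles = smiles.replace(lt, st)
  let smiles1 := longTokens.foldl (fun s p => PySem.Str.replace s p.1 p.2) smiles
  -- irregulars = set(smiles) - set_short_tokens  (each replace targets a single distinct
  -- character, so the result does not depend on Python's set-iteration order)
  let irregulars : PySem.Set Char := PySem.Set.diff (PySem.Set.ofList smiles1.toList) setShortTokens
  if irregulars.isEmpty then smiles1
  else irregulars.foldl (fun s t => PySem.Str.replace s (String.ofList [t]) " ") smiles1

-- ===== PORT B =====
def convertLongTokens_alt (smiles : String) : String :=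
  let allowed : PySem.Set Char :=
    PySem.Set.ofList "Kb(+9SF8.15-N/[nC7)O%0#6B\\@]4=P23sIHXYZ ".toList
  let s := PySem.Str.replace (PySem.Str.replace (PySem.Str.replace smiles "Br" "X") "Ni" "Y") "Cl" "Z"
  String.ofList (s.toList.map (fun c => if allowed.contains c then c else ' '))

-- ===== PRECONDITION & SPEC =====
def Spec_convertLongTokens (smiles : String) (out : String) : Prop := out = convertLongTokens_alt smiles
instance (smiles : String) (out : String) : Decidable (Spec_convertLongTokens smiles out) := by unfold Spec_convertLongTokens; infer_instance

-- ===== CLAIM (what is proved, stated in full; the proofs are below) =====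
def Claim_equal_convertLongTokens : Prop := ∀ (smiles : String), Dom_convertLongTokens smiles → Spec_convertLongTokens smiles (convertLongTokens smiles)

-- ===== LEMMAS AND PROOFS =====

-- replace with a single-character pattern is a per-character substitution
theorem go_single (t : Char) (l : List Char) : ∀ (fuel : Nat) (acc : List Char), l.length ≤ fuel →
    PySem.Chars.replace.go [t] [' '] fuel l acc = acc.reverse ++ l.map (fun c => if c = t then ' ' else c) := by
  induction l with
  | nil => intro fuel acc _; cases fuel <;> simp [PySem.Chars.replace.go]
  | cons c cs ih =>
    intro fuel acc h
    cases fuel with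
    | zero => simp at h
    | succ n =>
      rw [PySem.Chars.replace.go]
      simp only [List.isPrefixOf]
      by_cases hc : c = t
      · simp [hc, ih n _ (by simpa using h)]
      · simp [(by simp; exact fun h' => hc h'.symm : ¬ t == c), ih n _ (by simpa using h), hc]

theorem replace_single (t : Char) (cs : List Char) :
    PySem.Chars.replace cs [t] [' '] = cs.map (fun c => if c = t then ' ' else c) := by
  simp [PySem.Chars.replace, go_single t cs cs.length [] le_rfl]

-- folding single-character replaces over a space-free list of targets is one mapping pass
theorem foldl_replace (ts : List Char) : ∀ (cs : List Char), ' ' ∉ ts →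
    ts.foldl (fun s t => PySem.Chars.replace s [t] [' ']) cs
      = cs.map (fun c => if c ∈ ts then ' ' else c) := by
  induction ts with
  | nil => intro cs _; simp
  | cons t ts ih =>
    intro cs hsp
    have hsp' : ' ' ∉ ts := fun h => hsp (List.mem_cons_of_mem _ h)
    have hst : ' ' ≠ t := fun h => hsp (h ▸ List.mem_cons_self)
    rw [List.foldl_cons, replace_single, ih _ hsp', List.map_map]
    apply List.map_congr_left
    intro c _
    by_cases hc : c = t
    · simp [hc, hsp']
    · simp [hc, Function.comp]

-- lift the fold from strings to character lists
theorem toList_foldl_replace (ts : List Char) : ∀ (s : String),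
    (ts.foldl (fun s t => PySem.Str.replace s (String.ofList [t]) " ") s).toList
      = ts.foldl (fun l t => PySem.Chars.replace l [t] [' ']) s.toList := by
  induction ts with
  | nil => intro s; rfl
  | cons t ts ih =>
    intro s
    rw [List.foldl_cons, List.foldl_cons, ih, PySem.Str.toList_replace]
    rw [String.toList_ofList, (by decide : (" " : String).toList = [' '])]

-- ===== VERDICT (by name: the statement is the Claim_ definition above) =====
theorem convertLongTokens_spec : Claim_equal_convertLongTokens := by
  intro smiles _
  unfold Spec_convertLongTokens convertLongTokens convertLongTokens_alt
  simp only [List.foldl_cons, List.foldl_nil]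
  rw [show ("Kb(+9SF8.15-N/[nC7)O%0#6B\\@]4=P23sIHXYZ " : String).toList = ['K', 'b', '(', '+', '9', 'S', 'F', '8', '.', '1', '5', '-', 'N', '/', '[', 'n', 'C', '7', ')', 'O', '%', '0', '#', '6', 'B', '\\', '@', ']', '4', '=', 'P', '2', '3', 's', 'I', 'H', 'X', 'Y', 'Z', ' '] from by decide]
  set s1 := PySem.Str.replace (PySem.Str.replace (PySem.Str.replace smiles "Br" "X") "Ni" "Y") "Cl" "Z" with hs1
  set short : PySem.Set Char := PySem.Set.ofList ['K', 'b', '(', '+', '9', 'S', 'F', '8', '.', '1', '5', '-', 'N', '/', '[', 'n', 'C', '7', ')', 'O', '%', '0', '#', '6', 'B', '\\', '@', ']', '4', '=', 'P', '2', '3', 's', 'I', 'H', 'X', 'Y', 'Z', ' '] with hshort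
  set D : PySem.Set Char := PySem.Set.diff (PySem.Set.ofList s1.toList) short with hD
  have hmemD : ∀ c, c ∈ D ↔ (c ∈ s1.toList ∧ c ∉ short) := by
    intro c
    rw [hD, PySem.Set.mem_diff, PySem.Set.mem_ofList]
  have hspD : ' ' ∉ D := by
    intro h
    exact ((hmemD ' ').mp h).2 (by rw [hshort, PySem.Set.mem_ofList]; decide)
  by_cases hE : D.isEmpty
  · rw [if_pos hE]
    apply String.toList_inj.mp
    rw [String.toList_ofList]
    symm
    apply List.map_congr_left (g := id) ?_ |>.trans (List.map_id _)
    intro c hc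
    have : c ∉ D := by simp [List.isEmpty_iff.mp hE]
    have hcs : c ∈ short := by
      by_contra hns
      exact this ((hmemD c).mpr ⟨hc, hns⟩)
    rw [if_pos ((PySem.Set.contains_iff _ _).mpr hcs)]; rfl
  · rw [if_neg hE]
    apply String.toList_inj.mp
    rw [toList_foldl_replace, foldl_replace D s1.toList hspD, String.toList_ofList]
    apply List.map_congr_left
    intro c hc
    by_cases hcs : c ∈ short
    · have : c ∉ D := fun h => ((hmemD c).mp h).2 hcs
      simp [this]
      exact fun h => absurd hcs h
    · have : c ∈ D := (hmemD c).mpr ⟨hc, hcs⟩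
      simp [this]
      exact fun h => absurd h hcs
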